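-- pv_equiv track=rewrite | github.com/GRuizV/LearningRepo | Exercises/HackerRank/Problem Solving Files/Problem Solving Exercises - pt. II.py | bombs_effect_map
-- ===== SOURCE A (Python) =====
-- def bombs_effect_map(grid):
--
--     bombs_effect = list()
--
--     for i in range(len(grid)):
--
--         for j in range(len(grid[i])):
--
--             if grid[i][j] == 'O':
--
--                 #Top three cases: up-left corner, up mid, up-right corner
--                 if i == 0 and j == 0:
--                     bombs_effect.extend([(i,j), (i+1,j), (i,j+1)])
--
--                 elif i == 0 and j < len(grid[0])-1:
--                     bombs_effect.extend([(i,j), (i+1,j), (i,j+1), (i,j-1)])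
--
--                 elif i == 0 and j == len(grid[0])-1:
--                     bombs_effect.extend([(i,j), (i+1,j), (i,j-1)])
--
--
--                 #Middle three cases: mid-left corner, mid-mid, mid-right
--                 elif i < len(grid)-1 and j == 0:
--                     bombs_effect.extend([(i,j), (i+1,j), (i-1,j), (i,j+1)])
--
--                 elif i < len(grid)-1 and j < len(grid[0])-1:
--                     bombs_effect.extend([(i,j), (i-1,j), (i+1,j), (i,j+1), (i,j-1)])
--
--                 elif i < len(grid)-1 and j == len(grid[0])-1:
--                     bombs_effect.extend([(i,j), (i-1,j), (i+1,j), (i,j-1)])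
--
--
--
--                 #Bottom three cases: down-left corner, down-mid, down-right
--                 elif i == len(grid)-1 and j == 0:
--                     bombs_effect.extend([(i,j), (i-1,j), (i,j+1)])
--
--                 elif i == len(grid)-1 and j < len(grid[0])-1:
--                     bombs_effect.extend([(i,j), (i-1,j), (i,j+1), (i,j-1)])
--
--                 elif i == len(grid)-1 and j == len(grid[0])-1:
--                     bombs_effect.extend([(i,j), (i-1,j), (i,j-1)])
--
--
--     grid = ['.' * len(grid[0])] * len(grid)
--
--     for i in range(len(grid)):
--
--         for j in range(len(grid[i])):
--
--             if (i,j) not in bombs_effect: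
--                 grid[i] = grid[i][:j]+'O'+grid[i][j+1:]
--
--     return grid
-- ===== SOURCE B (Python) =====
-- def bombs_effect_map(grid):
--     C = len(grid[0])
--     R = len(grid)
--     result = []
--     for i in range(R):
--         row = grid[i]
--         up = grid[i - 1] if i > 0 else ''
--         down = grid[i + 1] if i + 1 < R else ''
--         cells = []
--         for j in range(C):
--             if ((j < len(row) and row[j] == 'O')
--                     or (j < len(up) and up[j] == 'O')
--                     or (j < len(down) and down[j] == 'O')
--                     or (0 < j and j - 1 < len(row) and row[j - 1] == 'O')
--                     or (j + 1 < C and j + 1 < len(row) and row[j + 1] == 'O')):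
--                 cells.append('.')
--             else:
--                 cells.append('O')
--         result.append(''.join(cells))
--     return result
-- ===== Notes on version B (the rewrite author's own statement) =====
-- stated objective: simpler
-- what changed: A builds an explicit coordinate table of blast effects via a 9-way positional elif chain and then rewrites an all-dots grid cell by cell with membership tests and string-slice surgery; B keeps no table at all and emits each output cell in one pass from a bounds-guarded scan of the cell and its four neighbours in the current/previous/next row.
import Mathlib
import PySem

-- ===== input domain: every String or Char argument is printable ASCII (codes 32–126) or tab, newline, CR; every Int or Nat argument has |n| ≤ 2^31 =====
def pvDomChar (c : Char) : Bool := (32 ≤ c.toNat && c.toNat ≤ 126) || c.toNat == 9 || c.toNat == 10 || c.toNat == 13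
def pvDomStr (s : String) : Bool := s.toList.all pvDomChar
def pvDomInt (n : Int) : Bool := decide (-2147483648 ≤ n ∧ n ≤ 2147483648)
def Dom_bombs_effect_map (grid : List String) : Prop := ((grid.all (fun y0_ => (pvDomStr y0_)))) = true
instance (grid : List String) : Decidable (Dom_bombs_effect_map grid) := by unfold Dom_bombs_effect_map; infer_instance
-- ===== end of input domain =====

-- B replaces A's build-a-blast-coordinate-table-then-invert scheme (9-way positional branch) by a
-- direct per-cell neighbourhood scan; objective: simpler. Equivalence is on the return value.


-- shared indexing helpers (plain 'grid[i]' / 'grid[i][j]' / 'len(grid[i])'; all uses are in range)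
def pvCell (grid : List String) (i j : Nat) : Char := ((grid.getD i "").toList).getD j ' '
def pvRowLen (grid : List String) (i : Nat) : Nat := (grid.getD i "").toList.length

-- ===== PORT A =====
-- the 9-way elif chain deciding which coordinates an 'O' at (i,j) affects
-- (Nat subtraction is exact here: the j = 0 branches come first, so 'j = C - 1'/'j < C - 1'
--  are only consulted with j ≥ 1, where they agree with Python's len(grid[0])-1 arithmetic)
def pvContribA (R C i j : Nat) : List (Nat × Nat) :=
  if i = 0 ∧ j = 0 then [(i,j), (i+1,j), (i,j+1)]
  else if i = 0 ∧ j < C - 1 then [(i,j), (i+1,j), (i,j+1), (i,j-1)]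
  else if i = 0 ∧ j = C - 1 then [(i,j), (i+1,j), (i,j-1)]
  else if i < R - 1 ∧ j = 0 then [(i,j), (i+1,j), (i-1,j), (i,j+1)]
  else if i < R - 1 ∧ j < C - 1 then [(i,j), (i-1,j), (i+1,j), (i,j+1), (i,j-1)]
  else if i < R - 1 ∧ j = C - 1 then [(i,j), (i-1,j), (i+1,j), (i,j-1)]
  else if i = R - 1 ∧ j = 0 then [(i,j), (i-1,j), (i,j+1)]
  else if i = R - 1 ∧ j < C - 1 then [(i,j), (i-1,j), (i,j+1), (i,j-1)]
  else if i = R - 1 ∧ j = C - 1 then [(i,j), (i-1,j), (i,j-1)]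
  else []

-- first loop nest: bombs_effect
def pvBombsEffect (grid : List String) : List (Nat × Nat) :=
  (List.range grid.length).foldl (fun acc i =>
    (List.range (pvRowLen grid i)).foldl (fun acc2 j =>
      if pvCell grid i j = 'O' then
        acc2 ++ pvContribA grid.length (pvRowLen grid 0) i j
      else acc2) acc) []

-- grid[i] = grid[i][:j] + 'O' + grid[i][j+1:]  (slices exact: 0 ≤ j < len at every use)
def pvSetO (cs : List Char) (j : Nat) : List Char := cs.take j ++ 'O' :: cs.drop (j+1)

def bombs_effect_map (grid : List String) : List String :=
  let be := pvBombsEffect grid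
  -- grid = ['.' * len(grid[0])] * len(grid)
  let C := pvRowLen grid 0
  let R := grid.length
  let grid2 := List.replicate R (String.ofList (List.replicate C '.'))
  -- second loop nest (range(len(grid[i])) is read once per i, from the current row)
  (List.range R).foldl (fun rows i =>
    rows.set i (String.ofList
      ((List.range ((rows.getD i "").toList.length)).foldl
        (fun cs j => if (i, j) ∉ be then pvSetO cs j else cs)
        (rows.getD i "").toList))) grid2

-- ===== PORT B =====
def bombs_effect_map_alt (grid : List String) : List String :=
  let C := pvRowLen grid 0
  let R := grid.length
  (List.range R).map (fun (i : Nat) =>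
    -- row = grid[i]; up = grid[i-1] if i > 0 else ''; down = grid[i+1] if i+1 < R else ''
    let row := (grid.getD i "").toList
    let up := if 0 < i then (grid.getD (i - 1) "").toList else []
    let down := if i + 1 < R then (grid.getD (i + 1) "").toList else []
    String.ofList ((List.range C).map (fun (j : Nat) =>
      if (j < row.length ∧ row.getD j ' ' = 'O')
         ∨ (j < up.length ∧ up.getD j ' ' = 'O')
         ∨ (j < down.length ∧ down.getD j ' ' = 'O')
         ∨ (0 < j ∧ j - 1 < row.length ∧ row.getD (j - 1) ' ' = 'O')
         ∨ (j + 1 < C ∧ j + 1 < row.length ∧ row.getD (j + 1) ' ' = 'O')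
      then '.' else 'O')))

-- ===== PRECONDITION & SPEC =====
-- Python A evaluates grid[0] (IndexError on the empty list); B reads len(grid[0]) first and
-- raises identically, so the empty grid is the only excluded input.
def Pre_bombs_effect_map (grid : List String) : Prop := grid ≠ []
instance (grid : List String) : Decidable (Pre_bombs_effect_map grid) := by
  unfold Pre_bombs_effect_map; infer_instance

def pvWitness_bombs_effect_map : List String := ["O..", "...", ".O."]

def Spec_bombs_effect_map (grid : List String) (out : List String) : Prop := out = bombs_effect_map_alt grid
instance (grid : List String) (out : List String) : Decidable (Spec_bombs_effect_map grid out) := by unfold Spec_bombs_effect_map; infer_instance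

-- ===== CLAIM (what is proved, stated in full; the proofs are below) =====
def Claim_equal_bombs_effect_map : Prop := ∀ (grid : List String), Dom_bombs_effect_map grid → Pre_bombs_effect_map grid → Spec_bombs_effect_map grid (bombs_effect_map grid)

-- ===== LEMMAS AND PROOFS =====

-- which cells an 'O' at (a,b) covers, abstractly
def pvCovers (C a b i j : Nat) : Prop :=
  (b = j ∧ (a = i ∨ a + 1 = i ∨ a = i + 1)) ∨ (a = i ∧ (b + 1 = j ∨ (b = j + 1 ∧ b < C)))

lemma pv_mem_contrib (R C a b i j : Nat) (ha : a < R) (hi : i < R) (hj : j < C) :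
    ((i, j) ∈ pvContribA R C a b) ↔ pvCovers C a b i j := by
  unfold pvContribA pvCovers
  split_ifs <;> simp [Prod.ext_iff] <;> omega

lemma pv_be_eq (grid : List String) :
    pvBombsEffect grid =
      (List.range grid.length).flatMap (fun a =>
        (List.range (pvRowLen grid a)).flatMap (fun b =>
          if pvCell grid a b = 'O' then
            pvContribA grid.length (pvRowLen grid 0) a b
          else [])) := by
  unfold pvBombsEffect
  have h1 : ∀ (a : Nat) (init : List (Nat × Nat)),
      (List.range (pvRowLen grid a)).foldl (fun acc2 j =>
        if pvCell grid a j = 'O' then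
          acc2 ++ pvContribA grid.length (pvRowLen grid 0) a j
        else acc2) init
      = init ++ (List.range (pvRowLen grid a)).flatMap (fun b =>
          if pvCell grid a b = 'O' then
            pvContribA grid.length (pvRowLen grid 0) a b
          else []) := by
    intro a init
    rw [PySem.List.foldl_congr_mem _ _
      (fun acc2 j => acc2 ++ (if pvCell grid a j = 'O' then
        pvContribA grid.length (pvRowLen grid 0) a j else [])) _
      (by intro acc j _; by_cases h : pvCell grid a j = 'O' <;> simp [h])]
    exact PySem.List.foldl_append_eq_flatMap _ _ _
  rw [PySem.List.foldl_congr_mem _ _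
    (fun acc i => acc ++ (List.range (pvRowLen grid i)).flatMap (fun b =>
      if pvCell grid i b = 'O' then
        pvContribA grid.length (pvRowLen grid 0) i b
      else [])) _
    (by intro acc i _; exact h1 i acc)]
  rw [PySem.List.foldl_append_eq_flatMap, List.nil_append]

lemma pv_mem_be (grid : List String) (i j : Nat)
    (hi : i < grid.length) (hj : j < pvRowLen grid 0) :
    ((i, j) ∈ pvBombsEffect grid) ↔
      ∃ a b, a < grid.length ∧ b < pvRowLen grid a ∧ pvCell grid a b = 'O' ∧
        pvCovers (pvRowLen grid 0) a b i j := by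
  rw [pv_be_eq]
  simp only [List.mem_flatMap, List.mem_range]
  constructor
  · rintro ⟨a, ha, b, hb, hmem⟩
    by_cases hO : pvCell grid a b = 'O'
    · rw [if_pos hO, pv_mem_contrib _ _ _ _ _ _ ha hi hj] at hmem
      exact ⟨a, b, ha, hb, hO, hmem⟩
    · rw [if_neg hO] at hmem; simp at hmem
  · rintro ⟨a, b, ha, hb, hO, hcov⟩
    refine ⟨a, ha, b, hb, ?_⟩
    rw [if_pos hO, pv_mem_contrib _ _ _ _ _ _ ha hi hj]
    exact hcov

-- the 5-neighbour check of B, characterised by the same existential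
-- the 5-neighbour check of B, characterised by the same existential
lemma pv_any_check (grid : List String) (i j : Nat)
    (hi : i < grid.length) (hj : j < pvRowLen grid 0) :
    ((j < (grid.getD i "").toList.length ∧ (grid.getD i "").toList.getD j ' ' = 'O')
     ∨ (j < (if 0 < i then (grid.getD (i - 1) "").toList else []).length ∧
        (if 0 < i then (grid.getD (i - 1) "").toList else []).getD j ' ' = 'O')
     ∨ (j < (if i + 1 < grid.length then (grid.getD (i + 1) "").toList else []).length ∧
        (if i + 1 < grid.length then (grid.getD (i + 1) "").toList else []).getD j ' ' = 'O')
     ∨ (0 < j ∧ j - 1 < (grid.getD i "").toList.length ∧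
        (grid.getD i "").toList.getD (j - 1) ' ' = 'O')
     ∨ (j + 1 < pvRowLen grid 0 ∧ j + 1 < (grid.getD i "").toList.length ∧
        (grid.getD i "").toList.getD (j + 1) ' ' = 'O'))
    ↔ ∃ a b, a < grid.length ∧ b < pvRowLen grid a ∧ pvCell grid a b = 'O' ∧
        pvCovers (pvRowLen grid 0) a b i j := by
  constructor
  · rintro (⟨hl, hc⟩ | h2 | h3 | ⟨h0, hl, hc⟩ | ⟨hC, hl, hc⟩)
    · exact ⟨i, j, hi, hl, hc, Or.inl ⟨rfl, Or.inl rfl⟩⟩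
    · by_cases h0 : 0 < i
      · rw [if_pos h0] at h2
        exact ⟨i - 1, j, by omega, h2.1, h2.2, Or.inl ⟨rfl, Or.inr (Or.inl (by omega))⟩⟩
      · rw [if_neg h0] at h2; simp at h2
    · by_cases h0 : i + 1 < grid.length
      · rw [if_pos h0] at h3
        exact ⟨i + 1, j, h0, h3.1, h3.2, Or.inl ⟨rfl, Or.inr (Or.inr rfl)⟩⟩
      · rw [if_neg h0] at h3; simp at h3
    · exact ⟨i, j - 1, hi, hl, hc, Or.inr ⟨rfl, Or.inl (by omega)⟩⟩
    · exact ⟨i, j + 1, hi, hl, hc, Or.inr ⟨rfl, Or.inr ⟨rfl, hC⟩⟩⟩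
  · rintro ⟨a, b, ha, hb, hO, hcov⟩
    rcases hcov with ⟨hbj, (hai | hai | hai)⟩ | ⟨hai, (hbj | hbj)⟩
    · subst hbj hai
      exact Or.inl ⟨hb, hO⟩
    · subst hbj
      refine Or.inr (Or.inl ?_)
      rw [if_pos (show 0 < i by omega), show i - 1 = a by omega]
      exact ⟨hb, hO⟩
    · subst hbj
      refine Or.inr (Or.inr (Or.inl ?_))
      rw [if_pos (show i + 1 < grid.length by omega), show i + 1 = a by omega]
      exact ⟨hb, hO⟩
    · subst hai
      refine Or.inr (Or.inr (Or.inr (Or.inl ⟨by omega, ?_, ?_⟩)))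
      · rw [show j - 1 = b by omega]; exact hb
      · rw [show j - 1 = b by omega]; exact hO
    · subst hai
      refine Or.inr (Or.inr (Or.inr (Or.inr ⟨by omega, ?_, ?_⟩)))
      · rw [show j + 1 = b by omega]; exact hb
      · rw [show j + 1 = b by omega]; exact hO

-- phase-2 inner loop: writing 'O' at every uncovered j turns the '.'-row into the map form
lemma pv_inner_row (be : List (Nat × Nat)) (i C : Nat) :
    ∀ n, n ≤ C →
      (List.range n).foldl (fun cs j => if (i, j) ∉ be then pvSetO cs j else cs)
          (List.replicate C '.')
        = (List.range C).map (fun j => if j < n ∧ (i, j) ∉ be then 'O' else '.') := by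
  intro n hn
  induction n with
  | zero =>
    simp only [List.range_zero, List.foldl_nil]
    apply List.ext_getElem (by simp)
    intro k hk1 hk2
    simp
  | succ m ih =>
    rw [List.range_succ, List.foldl_append, ih (by omega)]
    simp only [List.foldl_cons, List.foldl_nil]
    by_cases hmem : (i, m) ∉ be
    · rw [if_pos hmem]
      have hlen : m < ((List.range C).map
          (fun j => if j < m ∧ (i, j) ∉ be then 'O' else '.')).length := by
        simp; omega
      unfold pvSetO
      rw [← List.set_eq_take_cons_drop 'O' hlen]
      apply List.ext_getElem (by simp)
      intro k hk1 hk2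
      simp only [List.getElem_set, List.getElem_map, List.getElem_range]
      by_cases hkm : k = m
      · subst hkm; simp [hmem]
      · rw [if_neg (show ¬ m = k by omega)]
        have : (k < m ∧ (i, k) ∉ be) ↔ (k < m + 1 ∧ (i, k) ∉ be) := by
          constructor
          · rintro ⟨h1, h2⟩; exact ⟨by omega, h2⟩
          · rintro ⟨h1, h2⟩; exact ⟨by omega, h2⟩
        rw [if_congr this rfl rfl]
    · rw [if_neg hmem]
      apply List.map_congr_left
      intro k hk
      have : (k < m ∧ (i, k) ∉ be) ↔ (k < m + 1 ∧ (i, k) ∉ be) := by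
        constructor
        · rintro ⟨h1, h2⟩; exact ⟨by omega, h2⟩
        · rintro ⟨h1, h2⟩
          refine ⟨?_, h2⟩
          rcases Nat.lt_succ_iff_lt_or_eq.mp h1 with h | h
          · exact h
          · subst h; simp at hmem; exact absurd h2 (by simpa using hmem)
      rw [if_congr this rfl rfl]

-- phase-2 outer loop: each iteration rewrites exactly row i of the all-dots grid
lemma pv_outer_rows (R : Nat) (s0 : String) (g : Nat → String → String) :
    ∀ n, n ≤ R →
      (List.range n).foldl (fun rows i => rows.set i (g i (rows.getD i "")))
          (List.replicate R s0)
        = (List.range R).map (fun i => if i < n then g i s0 else s0) := by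
  intro n hn
  induction n with
  | zero =>
    simp only [List.range_zero, List.foldl_nil]
    apply List.ext_getElem (by simp)
    intro k hk1 hk2
    simp
  | succ m ih =>
    rw [List.range_succ, List.foldl_append, ih (by omega)]
    simp only [List.foldl_cons, List.foldl_nil]
    have hget : ((List.range R).map (fun i => if i < m then g i s0 else s0)).getD m "" = s0 := by
      have hm : m < ((List.range R).map (fun i => if i < m then g i s0 else s0)).length := by
        simp; omega
      rw [List.getD_eq_getElem _ _ hm]
      simp
    rw [hget]
    apply List.ext_getElem (by simp)
    intro k hk1 hk2
    simp only [List.getElem_set, List.getElem_map, List.getElem_range]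
    by_cases hkm : k = m
    · subst hkm; simp
    · rw [if_neg (show ¬ m = k by omega)]
      have : (k < m) ↔ (k < m + 1) := by
        constructor <;> intro h
        · omega
        · rcases Nat.lt_succ_iff_lt_or_eq.mp h with h | h
          · exact h
          · exact absurd h hkm
      rw [if_congr this rfl rfl]



-- ===== VERDICT (by name: the statement is the Claim_ definition above) =====
theorem bombs_effect_map_spec : Claim_equal_bombs_effect_map := by
  intro grid _ _
  simp only [Spec_bombs_effect_map, bombs_effect_map, bombs_effect_map_alt]
  rw [pv_outer_rows grid.length (String.ofList (List.replicate (pvRowLen grid 0) '.'))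
    (fun i s => String.ofList
      ((List.range s.toList.length).foldl
        (fun cs j => if (i, j) ∉ pvBombsEffect grid then pvSetO cs j else cs) s.toList))
    grid.length (le_refl _)]
  apply List.map_congr_left
  intro i hi
  rw [if_pos (List.mem_range.mp hi)]
  rw [String.toList_ofList, List.length_replicate,
    pv_inner_row (pvBombsEffect grid) i (pvRowLen grid 0) (pvRowLen grid 0) (le_refl _)]
  apply congrArg String.ofList
  apply List.map_congr_left
  intro j hj
  have hj' : j < pvRowLen grid 0 := List.mem_range.mp hj
  have hmem := pv_mem_be grid i j (List.mem_range.mp hi) hj'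
  have hchk := pv_any_check grid i j (List.mem_range.mp hi) hj'
  by_cases hb : ((j < (grid.getD i "").toList.length ∧ (grid.getD i "").toList.getD j ' ' = 'O')
     ∨ (j < (if 0 < i then (grid.getD (i - 1) "").toList else []).length ∧
        (if 0 < i then (grid.getD (i - 1) "").toList else []).getD j ' ' = 'O')
     ∨ (j < (if i + 1 < grid.length then (grid.getD (i + 1) "").toList else []).length ∧
        (if i + 1 < grid.length then (grid.getD (i + 1) "").toList else []).getD j ' ' = 'O')
     ∨ (0 < j ∧ j - 1 < (grid.getD i "").toList.length ∧
        (grid.getD i "").toList.getD (j - 1) ' ' = 'O')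
     ∨ (j + 1 < pvRowLen grid 0 ∧ j + 1 < (grid.getD i "").toList.length ∧
        (grid.getD i "").toList.getD (j + 1) ' ' = 'O'))
  · rw [if_neg (fun hcon => hcon.2 (hmem.mpr (hchk.mp hb))), if_pos hb]
  · rw [if_pos ⟨hj', fun hmemb => hb (hchk.mpr (hmem.mp hmemb))⟩, if_neg hb]
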